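-- pv_equiv track=rewrite | github.com/sa-taylor/WebSpyder | sitemap_parse.py | filter_parent_links
-- ===== SOURCE A (Python) =====
-- def filter_parent_links(links):
--     # Filter out parent links from the given list of links
--     filtered_links = []
--     for link in links:
--         is_parent = False
--         for other_link in links:
--             if other_link.startswith(link) and other_link != link:
--                 is_parent = True
--                 break
--         if not is_parent:
--             filtered_links.append(link)
--     return filtered_links
-- ===== SOURCE B (Python) =====
-- def filter_parent_links(links):
--     # Sort the distinct links; a link is a proper prefix of some other link
--     # iff it is a prefix of its immediate successor in sorted order.
--     uniq = sorted(set(links))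
--     parents = set()
--     for a, b in zip(uniq, uniq[1:]):
--         if b.startswith(a):
--             parents.add(a)
--     return [link for link in links if link not in parents]
-- ===== Notes on version B (the rewrite author's own statement) =====
-- stated objective: faster
-- what changed: Instead of scanning all n links for each link (all-pairs prefix test), B sorts the distinct links once and marks a link as a parent by checking only its immediate sorted successor, then filters the original list in one pass.
import Mathlib
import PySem

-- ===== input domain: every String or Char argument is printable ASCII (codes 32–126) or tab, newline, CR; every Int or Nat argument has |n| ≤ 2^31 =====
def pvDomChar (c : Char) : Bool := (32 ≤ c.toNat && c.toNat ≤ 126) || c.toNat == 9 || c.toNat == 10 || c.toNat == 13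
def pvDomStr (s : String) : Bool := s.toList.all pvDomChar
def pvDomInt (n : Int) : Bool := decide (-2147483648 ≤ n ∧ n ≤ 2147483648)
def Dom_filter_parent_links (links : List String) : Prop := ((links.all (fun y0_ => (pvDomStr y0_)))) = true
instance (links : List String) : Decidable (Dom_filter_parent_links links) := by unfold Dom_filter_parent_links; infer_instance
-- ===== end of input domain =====

-- B replaces A's all-pairs prefix scan by sorting the distinct links and testing
-- only each link's immediate sorted successor for the prefix relation (objective: faster).

-- ===== PORT A =====
def filter_parent_links (links : List String) : List String :=
  links.foldl (fun filtered_links link =>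
    let is_parent := links.any fun other_link =>
      PySem.Str.startswith other_link link && other_link != link
    if !is_parent then filtered_links ++ [link] else filtered_links) []

-- ===== PORT B =====
def filter_parent_links_alt (links : List String) : List String :=
  let uniq := PySem.List.sorted (PySem.Set.ofList links) (fun x => x) false
  let parents : PySem.Set String :=
    (uniq.zip (uniq.drop 1)).foldl
      (fun ps p => if PySem.Str.startswith p.2 p.1 then PySem.Set.add ps p.1 else ps)
      PySem.Set.empty
  links.filter (fun link => !(PySem.Set.contains parents link))

-- ===== PRECONDITION & SPEC =====
def Spec_filter_parent_links (links : List String) (out : List String) : Prop := out = filter_parent_links_alt links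
instance (links : List String) (out : List String) : Decidable (Spec_filter_parent_links links out) := by unfold Spec_filter_parent_links; infer_instance

-- ===== CLAIM (what is proved, stated in full; the proofs are below) =====
def Claim_equal_filter_parent_links : Prop := ∀ (links : List String), Dom_filter_parent_links links → Spec_filter_parent_links links (filter_parent_links links)

-- ===== LEMMAS AND PROOFS =====

theorem pv_lex_append (cs r : List Char) (hr : r ≠ []) : List.Lex (· < ·) cs (cs ++ r) := by
  induction cs with
  | nil => cases r with
    | nil => exact absurd rfl hr
    | cons b bs => exact List.Lex.nil
  | cons a cs' ih => exact List.Lex.cons ih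

theorem pv_lt_of_prefix_ne (s t : String) (hpre : s.toList <+: t.toList) (hne : s ≠ t) : s < t := by
  rw [String.lt_iff_toList_lt]
  obtain ⟨r, hr⟩ := hpre
  have hrne : r ≠ [] := by
    rintro rfl
    exact hne (String.ext_iff.mpr (by simpa using hr))
  rw [← hr]
  exact pv_lex_append s.toList r hrne

theorem pv_prefix_of_between (cs us ts : List Char) (hpre : cs <+: ts)
    (hlt : List.Lex (· < ·) cs us) (hle : us = ts ∨ List.Lex (· < ·) us ts) :
    cs <+: us := by
  induction cs generalizing us ts with
  | nil => exact List.nil_prefix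
  | cons a cs' ih =>
    obtain ⟨r, rfl⟩ := hpre
    cases hlt with
    | rel hab =>
      exfalso
      rcases hle with heq | hlex
      · rw [List.cons_append] at heq
        injection heq with h1 _
        exact absurd h1.symm (ne_of_lt hab)
      · rw [List.cons_append] at hlex
        cases hlex with
        | rel h => exact absurd h (not_lt_of_gt hab)
        | cons h => exact absurd rfl (ne_of_gt hab)
    | cons hlt' =>
      rename_i us'
      have hle' : us' = cs' ++ r ∨ List.Lex (· < ·) us' (cs' ++ r) := by
        rcases hle with heq | hlex
        · rw [List.cons_append] at heq
          injection heq with _ h2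
          exact Or.inl h2
        · rw [List.cons_append] at hlex
          cases hlex with
          | rel h => exact absurd h (lt_irrefl a)
          | cons h => exact Or.inr h
      exact List.cons_prefix_cons.mpr ⟨rfl, ih us' (cs' ++ r) ⟨r, rfl⟩ hlt' hle'⟩

theorem pv_mem_fold_parents (pairs : List (String × String)) (s : PySem.Set String) (x : String) :
    x ∈ pairs.foldl (fun ps p => if PySem.Str.startswith p.2 p.1 then PySem.Set.add ps p.1 else ps) s
      ↔ x ∈ s ∨ ∃ p ∈ pairs, PySem.Str.startswith p.2 p.1 = true ∧ p.1 = x := by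
  induction pairs generalizing s with
  | nil => simp
  | cons q t ih =>
    simp only [List.foldl_cons, List.mem_cons]
    by_cases h : PySem.Str.startswith q.2 q.1 = true
    · rw [if_pos h, ih, PySem.Set.mem_add]
      constructor
      · rintro ((hs | rfl) | ⟨p, hp, h1, h2⟩)
        · exact Or.inl hs
        · exact Or.inr ⟨q, Or.inl rfl, h, rfl⟩
        · exact Or.inr ⟨p, Or.inr hp, h1, h2⟩
      · rintro (hs | ⟨p, (rfl | hp), h1, h2⟩)
        · exact Or.inl (Or.inl hs)
        · exact Or.inl (Or.inr h2.symm)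
        · exact Or.inr ⟨p, hp, h1, h2⟩
    · rw [if_neg h, ih]
      constructor
      · rintro (hs | ⟨p, hp, h1, h2⟩)
        · exact Or.inl hs
        · exact Or.inr ⟨p, Or.inr hp, h1, h2⟩
      · rintro (hs | ⟨p, (rfl | hp), h1, h2⟩)
        · exact Or.inl hs
        · exact absurd h1 h
        · exact Or.inr ⟨p, hp, h1, h2⟩

theorem pv_key (links : List String) (link : String) (hmem : link ∈ links) :
    (links.any fun other_link => PySem.Str.startswith other_link link && other_link != link)
      = PySem.Set.contains
          ((let uniq := PySem.List.sorted (PySem.Set.ofList links) (fun x => x) false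
            (uniq.zip (uniq.drop 1)).foldl
              (fun ps p => if PySem.Str.startswith p.2 p.1 then PySem.Set.add ps p.1 else ps)
              PySem.Set.empty)) link := by
  set uniq := PySem.List.sorted (PySem.Set.ofList links) (fun x => x) false with huniq
  have hmemu : ∀ x : String, x ∈ uniq ↔ x ∈ links := by
    intro x
    rw [huniq, PySem.List.mem_sorted, PySem.Set.mem_ofList]
  have hpair : uniq.Pairwise (· < ·) := PySem.List.sorted_ofList_pairwise_lt links
  have hget := List.pairwise_iff_getElem.mp hpair
  apply Bool.eq_iff_iff.mpr
  rw [List.any_eq_true, PySem.Set.contains_iff, pv_mem_fold_parents]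
  simp only [PySem.Set.empty, List.not_mem_nil, false_or, Bool.and_eq_true, bne_iff_ne, ne_eq]
  constructor
  · rintro ⟨o, ho, hsw, hne⟩
    -- indices of link and o in uniq
    obtain ⟨i, hi, hlink⟩ := List.mem_iff_getElem.mp ((hmemu link).mpr hmem)
    obtain ⟨j, hj, ho'⟩ := List.mem_iff_getElem.mp ((hmemu o).mpr ho)
    have hpre : link.toList <+: o.toList := (PySem.Chars.startswith_iff _ _).mp (by simpa using hsw)
    have hlto : link < o := pv_lt_of_prefix_ne link o hpre (Ne.symm hne)
    have hij : i < j := by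
      rcases lt_trichotomy i j with h | h | h
      · exact h
      · exact absurd (by rw [← ho', ← hlink]; exact getElem_congr rfl h.symm hj) hne
      · exact absurd (hlink ▸ ho' ▸ hget j i hj hi h) (not_lt_of_gt hlto)
    have hi1 : i + 1 < uniq.length := lt_of_le_of_lt hij hj
    -- the adjacent pair
    have hzlen : i < (uniq.zip (uniq.drop 1)).length := by
      simp [List.length_zip]
      omega
    have hdrop : (uniq.drop 1)[i]'(by simp; omega) = uniq[i + 1]'hi1 := by
      rw [List.getElem_drop]
      congr 1
      omega
    have hz : (uniq.zip (uniq.drop 1))[i]'hzlen = (uniq[i]'hi, uniq[i+1]'hi1) := by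
      rw [List.getElem_zip, hdrop]
    refine ⟨(uniq[i]'hi, uniq[i+1]'hi1), hz ▸ List.getElem_mem hzlen, ?_, hlink⟩
    -- startswith uniq[i+1] uniq[i]
    have hlt1 : (uniq[i]'hi) < uniq[i+1]'hi1 := hget i (i+1) hi hi1 (by omega)
    have hle2 : (uniq[i+1]'hi1) = o ∨ (uniq[i+1]'hi1) < o := by
      rcases Nat.lt_or_ge (i+1) j with h | h
      · exact Or.inr (ho' ▸ hget (i+1) j hi1 hj h)
      · have hj' : i + 1 = j := by omega
        subst hj'
        exact Or.inl ho'
    have : (uniq[i]'hi).toList <+: (uniq[i+1]'hi1).toList := by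
      apply pv_prefix_of_between _ _ o.toList (hlink ▸ hpre)
      · exact String.lt_iff_toList_lt.mp (hlink ▸ hlt1)
      · rcases hle2 with h | h
        · exact Or.inl (by rw [h])
        · exact Or.inr (String.lt_iff_toList_lt.mp h)
    simpa using (PySem.Chars.startswith_iff _ _).mpr this
  · rintro ⟨p, hp, hsw, rfl⟩
    obtain ⟨k, hk, hpk⟩ := List.mem_iff_getElem.mp hp
    have hk1 : k + 1 < uniq.length := by
      simp [List.length_zip] at hk
      omega
    have hkl : k < uniq.length := by omega
    have hdrop : (uniq.drop 1)[k]'(by simp; omega) = uniq[k + 1]'hk1 := by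
      rw [List.getElem_drop]
      congr 1
      omega
    have hpk' : p = (uniq[k]'hkl, uniq[k+1]'hk1) := by
      rw [← hpk, List.getElem_zip, hdrop]
    subst hpk'
    have hlt1 : (uniq[k]'hkl) < uniq[k+1]'hk1 := hget k (k+1) hkl hk1 (by omega)
    exact ⟨uniq[k+1]'hk1, (hmemu _).mp (List.getElem_mem hk1), hsw, hlt1.ne'⟩

-- ===== VERDICT (by name: the statement is the Claim_ definition above) =====
theorem filter_parent_links_spec : Claim_equal_filter_parent_links := by
  intro links _
  unfold Spec_filter_parent_links filter_parent_links filter_parent_links_alt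
  rw [PySem.List.foldl_append_if_eq_filter]
  simp only [List.nil_append]
  apply List.filter_congr
  intro link hmem
  rw [pv_key links link hmem]
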